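-- pv_equiv track=rewrite | github.com/gouldberg/robotics-path-planning | src_path_planning/10_path_planning_01_rrt_07_informed_rrt_star.py | i4_bit_lo0
-- ===== SOURCE A (Python) =====
-- def i4_bit_lo0(n):
--     """
--      I4_BIT_LO0 returns the position of the low 0 bit base 2 in an I4.
--
--       Discussion:
--
--         An I4 is an integer ( kind = 4 ) value.
--
--       Example:
--
--            N    Binary    Lo 0
--         ----    --------  ----
--            0           0     1
--            1           1     2
--            2          10     1
--            3          11     3
--            4         100     1
--            5         101     2
--            6         110     1
--            7         111     4
--            8        1000     1
--            9        1001     2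
--           10        1010     1
--           11        1011     3
--           12        1100     1
--           13        1101     2
--           14        1110     1
--           15        1111     5
--           16       10000     1
--           17       10001     2
--         1023  1111111111    11
--         1024 10000000000     1
--         1025 10000000001     2
--
--       Licensing:
--
--         This code is distributed under the GNU LGPL license.
--
--       Modified:
--
--         08 February 2018
--
--       Author:
--
--         John Burkardt
--
--       Parameters:
--
--         Input, integer N, the integer to be measured.
--         N should be nonnegative.
--
--         Output, integer BIT, the position of the low 1 bit.
--
--     """
--     bit = 0
--     i = n
--
--     while True:
--
--         bit = bit + 1
--         i2 = i // 2
--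
--         if i == 2 * i2:
--             break
--
--         i = i2
--
--     return bit
-- ===== SOURCE B (Python) =====
-- def i4_bit_lo0(n):
--     # closed form: n ^ (n+1) is a mask of the trailing 1-run plus the first 0 bit;
--     # its bit length is the 1-indexed position of the lowest 0 bit.
--     return (n ^ (n + 1)).bit_length()
-- ===== Notes on version B (the rewrite author's own statement) =====
-- stated objective: idiomatic
-- what changed: The bit-by-bit halving loop is replaced by the closed-form one-liner (n ^ (n+1)).bit_length(): xoring n with its successor masks exactly the trailing run of one-bits plus the lowest zero bit, and the bit length of that mask is the position sought.
-- outside the precondition, e.g. on i4_bit_lo0(-1): A does not finish within the time limit, B returns 1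
import Mathlib
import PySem

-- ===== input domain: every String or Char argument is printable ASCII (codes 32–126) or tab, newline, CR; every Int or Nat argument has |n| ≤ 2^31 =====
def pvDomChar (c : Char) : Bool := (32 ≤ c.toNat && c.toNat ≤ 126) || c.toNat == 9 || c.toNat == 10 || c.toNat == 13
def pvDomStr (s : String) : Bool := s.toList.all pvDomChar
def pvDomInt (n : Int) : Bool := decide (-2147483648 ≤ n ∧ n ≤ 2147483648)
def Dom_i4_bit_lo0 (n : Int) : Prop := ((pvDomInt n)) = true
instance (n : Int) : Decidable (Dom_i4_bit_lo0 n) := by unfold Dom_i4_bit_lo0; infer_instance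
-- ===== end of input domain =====

-- B replaces A's bit-by-bit halving loop with the closed form (n ^ (n+1)).bit_length() (objective: idiomatic).
-- Return-value equivalence only; neither version mutates anything.

-- ===== PORT A =====
-- A's `while True` loop: bit += 1; i2 = i // 2; break when i == 2*i2 else i = i2.
-- The fuel argument only makes the recursion total; for n ≠ -1 (Pre_) it is never exhausted,
-- since |i| strictly shrinks on every non-breaking step.
def i4_bit_lo0_loop (fuel : Nat) (bit : Int) (i : Int) : Int :=
  match fuel with
  | 0 => bit
  | fuel + 1 =>
    if i = 2 * PySem.Int.floordiv i 2 then bit + 1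
    else i4_bit_lo0_loop fuel (bit + 1) (PySem.Int.floordiv i 2)

def i4_bit_lo0 (n : Int) : Int :=
  i4_bit_lo0_loop (n.natAbs + 1) 0 n

-- ===== PORT B =====
def i4_bit_lo0_alt (n : Int) : Int :=
  (PySem.Int.bitLength (PySem.Int.bxor n (n + 1)) : Int)

-- ===== PRECONDITION & SPEC =====
-- Pre_ excludes only n = -1, the one input on which Python A never terminates
-- (there i // 2 == i, so the loop never breaks).
def Pre_i4_bit_lo0 (n : Int) : Prop := n ≠ -1
instance (n : Int) : Decidable (Pre_i4_bit_lo0 n) := by unfold Pre_i4_bit_lo0; infer_instance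
def pvWitness_i4_bit_lo0 : Int := (5)

def Spec_i4_bit_lo0 (n : Int) (out : Int) : Prop := out = i4_bit_lo0_alt n
instance (n : Int) (out : Int) : Decidable (Spec_i4_bit_lo0 n out) := by unfold Spec_i4_bit_lo0; infer_instance

-- ===== CLAIM (what is proved, stated in full; the proofs are below) =====
def Claim_equal_i4_bit_lo0 : Prop := ∀ (n : Int), Dom_i4_bit_lo0 n → Pre_i4_bit_lo0 n → Spec_i4_bit_lo0 n (i4_bit_lo0 n)

-- ===== LEMMAS AND PROOFS =====

-- number of trailing 1-bits of m, plus 1 (= position of the lowest 0 bit of m ≥ 0)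
def trail (m : Nat) : Nat :=
  if h : m % 2 = 1 then trail (m / 2) + 1 else 1
decreasing_by exact Nat.div_lt_self (by omega) (by omega)

-- number of trailing 0-bits of j, plus 1 (= position of the lowest 1 bit of j ≥ 1)
def trailZ (j : Nat) : Nat :=
  if h : j % 2 = 0 ∧ j ≠ 0 then trailZ (j / 2) + 1 else 1
decreasing_by exact Nat.div_lt_self (by omega) (by omega)

lemma trail_even (m : Nat) (h : m % 2 = 0) : trail m = 1 := by
  rw [trail]; simp [h]

lemma trail_odd (m : Nat) (h : m % 2 = 1) : trail m = trail (m / 2) + 1 := by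
  rw [trail]; simp [h]

lemma trailZ_odd (j : Nat) (h : j % 2 = 1) : trailZ j = 1 := by
  rw [trailZ]; simp [h]

lemma trailZ_even (j : Nat) (h : j % 2 = 0) (h0 : j ≠ 0) : trailZ j = trailZ (j / 2) + 1 := by
  rw [trailZ]; simp [h, h0]

lemma loop_eq_trail : ∀ (fuel : Nat) (bit i : Int), 0 ≤ i → i.toNat < fuel →
    i4_bit_lo0_loop fuel bit i = bit + (trail i.toNat : Int) := by
  intro fuel
  induction fuel with
  | zero => intro bit i _ h; omega
  | succ f ih =>
    intro bit i hi hf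
    rw [i4_bit_lo0_loop]
    have hfd : PySem.Int.floordiv i 2 = i / 2 :=
      PySem.Int.floordiv_eq_ediv_of_pos (by omega)
    by_cases he : i = 2 * (PySem.Int.floordiv i 2)
    · rw [if_pos he]
      have hm : i.toNat % 2 = 0 := by
        rw [hfd] at he; omega
      rw [trail_even _ hm]
      simp
    · rw [if_neg he, hfd]
      rw [hfd] at he
      have hodd : i.toNat % 2 = 1 := by omega
      have h2 : (i / 2).toNat = i.toNat / 2 := by omega
      rw [ih (bit + 1) (i / 2) (by omega) (by omega)]
      rw [trail_odd _ hodd, h2]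
      push_cast
      ring

lemma loop_eq_trailZ : ∀ (fuel : Nat) (bit i : Int), i ≤ -2 → (-i - 1).toNat < fuel →
    i4_bit_lo0_loop fuel bit i = bit + (trailZ (-i - 1).toNat : Int) := by
  intro fuel
  induction fuel with
  | zero => intro bit i hi h; omega
  | succ f ih =>
    intro bit i hi hf
    rw [i4_bit_lo0_loop]
    have hfd : PySem.Int.floordiv i 2 = i / 2 :=
      PySem.Int.floordiv_eq_ediv_of_pos (by omega)
    by_cases he : i = 2 * (PySem.Int.floordiv i 2)
    · rw [if_pos he]
      have hj : (-i - 1).toNat % 2 = 1 := by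
        rw [hfd] at he; omega
      rw [trailZ_odd _ hj]
      simp
    · rw [if_neg he, hfd]
      rw [hfd] at he
      have hodd : (-i - 1).toNat % 2 = 0 ∧ 2 ≤ (-i - 1).toNat := by omega
      have hi2 : i / 2 ≤ -2 := by omega
      have h2 : (-(i / 2) - 1).toNat = (-i - 1).toNat / 2 := by omega
      rw [ih (bit + 1) (i / 2) hi2 (by rw [h2]; omega)]
      rw [h2, trailZ_even ((-i - 1).toNat) hodd.1 (by omega)]
      push_cast
      ring

lemma xor_succ_even (k : Nat) : (2 * k) ^^^ (2 * k + 1) = 1 := by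
  have : (2 * k) ^^^ (2 * k + 1) = Nat.bit false k ^^^ Nat.bit true k := by
    simp [Nat.bit_val]
  rw [this, Nat.xor_bit]
  simp [Nat.bit_val]

lemma xor_succ_odd (k : Nat) : (2 * k + 1) ^^^ (2 * k + 2) = 2 * (k ^^^ (k + 1)) + 1 := by
  have : (2 * k + 1) ^^^ (2 * k + 2) = Nat.bit true k ^^^ Nat.bit false (k + 1) := by
    simp [Nat.bit_val]; ring
  rw [this, Nat.xor_bit]
  simp [Nat.bit_val]

lemma half_odd (x : Nat) : (2 * x + 1) / 2 = x := by omega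

lemma half_even (x : Nat) : (2 * x) / 2 = x := by omega

lemma xor_pred_even (k : Nat) (hk : 1 ≤ k) : (2 * k) ^^^ (2 * k - 1) = 2 * (k ^^^ (k - 1)) + 1 := by
  have : (2 * k) ^^^ (2 * k - 1) = Nat.bit false k ^^^ Nat.bit true (k - 1) := by
    simp [Nat.bit_val]; omega
  rw [this, Nat.xor_bit]
  simp [Nat.bit_val]

lemma bitLength_xor_succ : ∀ (m : Nat),
    PySem.Int.bitLength ((m ^^^ (m + 1) : Nat) : Int) = trail m := by
  intro m
  induction m using Nat.strong_induction_on with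
  | _ m ih =>
    by_cases hm : m % 2 = 1
    · obtain ⟨k, hk⟩ : ∃ k, m = 2 * k + 1 := ⟨m / 2, by omega⟩
      subst hk
      have hx : (2 * k + 1) ^^^ (2 * k + 1 + 1) = 2 * (k ^^^ (k + 1)) + 1 := by
        have := xor_succ_odd k; omega
      rw [hx]
      have hpos : 0 < 2 * (k ^^^ (k + 1)) + 1 := by omega
      rw [PySem.Int.bitLength_natCast hpos]
      rw [half_odd, ih k (by omega), trail_odd _ hm]
      rw [show (2 * k + 1) / 2 = k from by omega]
    · obtain ⟨k, hk⟩ : ∃ k, m = 2 * k := ⟨m / 2, by omega⟩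
      subst hk
      rw [xor_succ_even k, trail_even _ (by omega)]
      decide

lemma bitLength_xor_pred : ∀ (j : Nat), 1 ≤ j →
    PySem.Int.bitLength ((j ^^^ (j - 1) : Nat) : Int) = trailZ j := by
  intro j
  induction j using Nat.strong_induction_on with
  | _ j ih =>
    intro hj
    by_cases hm : j % 2 = 1
    · obtain ⟨k, hk⟩ : ∃ k, j = 2 * k + 1 := ⟨j / 2, by omega⟩
      subst hk
      have hx : (2 * k + 1) ^^^ (2 * k + 1 - 1) = 1 := by
        rw [Nat.add_sub_cancel, Nat.xor_comm]
        exact xor_succ_even k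
      rw [hx, trailZ_odd _ hm]
      decide
    · obtain ⟨k, hk⟩ : ∃ k, j = 2 * k := ⟨j / 2, by omega⟩
      subst hk
      have hk1 : 1 ≤ k := by omega
      rw [xor_pred_even k hk1]
      have hpos : 0 < 2 * (k ^^^ (k - 1)) + 1 := by omega
      rw [PySem.Int.bitLength_natCast hpos]
      rw [half_odd, ih k (by omega) hk1, trailZ_even (2 * k) (by omega) (by omega)]
      rw [half_even]

-- ===== VERDICT (by name: the statement is the Claim_ definition above) =====
theorem i4_bit_lo0_spec : Claim_equal_i4_bit_lo0 := by
  intro n _ hpre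
  replace hpre : n ≠ -1 := hpre
  unfold Spec_i4_bit_lo0 i4_bit_lo0 i4_bit_lo0_alt
  by_cases hn : 0 ≤ n
  · rw [loop_eq_trail (n.natAbs + 1) 0 n hn (by omega)]
    obtain ⟨m, rfl⟩ : ∃ m : Nat, n = (m : Int) := ⟨n.toNat, by omega⟩
    have hx : PySem.Int.bxor (m : Int) ((m : Int) + 1) = ((m ^^^ (m + 1) : Nat) : Int) := by
      have := PySem.Int.bxor_natCast m (m + 1)
      push_cast at this ⊢
      exact this
    rw [hx, bitLength_xor_succ m]
    simp
  · have hn2 : n ≤ -2 := by omega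
    rw [loop_eq_trailZ (n.natAbs + 1) 0 n hn2 (by omega)]
    have hx : PySem.Int.bxor n (n + 1) =
        (((-n - 1).toNat ^^^ ((-n - 1).toNat - 1) : Nat) : Int) := by
      rw [PySem.Int.bxor]
      rw [if_neg (by omega), if_neg (by omega)]
      have : (-(n + 1) - 1).toNat = (-n - 1).toNat - 1 := by omega
      rw [this]
    rw [hx, bitLength_xor_pred _ (by omega)]
    simp
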